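-- pv_equiv track=rewrite | github.com/mikenano1/STRYDA-v2 | backend-minimal/retrieval_service.py | find_boundary_right
-- ===== SOURCE A (Python) =====
-- def find_boundary_right(content: str, pos: int) -> int:
--     """Walk right to clean boundary (newline, period, pipe, or end)."""
--     length = len(content)
--     while pos < length:
--         char = content[pos]
--         if char == '\n':
--             pos += 1
--             break
--         if char == '.' and (pos + 1 >= length or content[pos + 1] in ' \n'):
--             pos += 1
--             break
--         if char == '|':
--             remaining = content[pos:].split('\n')[0]
--             if remaining.count('|') <= 1:
--                 pos += 1
--                 break
--         pos += 1
--     return pos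
-- ===== SOURCE B (Python) =====
-- def find_boundary_right(content: str, pos: int) -> int:
--     """Walk right to clean boundary (newline, period, pipe, or end)."""
--     n = len(content)
--     if pos >= n:
--         return pos
--     tail = content[pos:]
--     pipes = tail.split('\n', 1)[0].count('|')
--     for off, c in enumerate(tail):
--         if c == '\n':
--             return pos + off + 1
--         if c == '.' and (off + 1 == len(tail) or tail[off + 1] in ' \n'):
--             return pos + off + 1
--         if c == '|':
--             if pipes <= 1:
--                 return pos + off + 1
--             pipes -= 1
--     return n
-- ===== Notes on version B (the rewrite author's own statement) =====
-- stated objective: faster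
-- what changed: B slices the tail once, precomputes the number of pipes on the current line, and does a single left-to-right scan with a decrementing pipe counter, instead of A's re-slicing, re-splitting and re-counting the rest of the line at every '|' it meets.
-- outside the precondition, e.g. on find_boundary_right('x.', -1): A returns 2, B returns 0
import Mathlib
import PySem

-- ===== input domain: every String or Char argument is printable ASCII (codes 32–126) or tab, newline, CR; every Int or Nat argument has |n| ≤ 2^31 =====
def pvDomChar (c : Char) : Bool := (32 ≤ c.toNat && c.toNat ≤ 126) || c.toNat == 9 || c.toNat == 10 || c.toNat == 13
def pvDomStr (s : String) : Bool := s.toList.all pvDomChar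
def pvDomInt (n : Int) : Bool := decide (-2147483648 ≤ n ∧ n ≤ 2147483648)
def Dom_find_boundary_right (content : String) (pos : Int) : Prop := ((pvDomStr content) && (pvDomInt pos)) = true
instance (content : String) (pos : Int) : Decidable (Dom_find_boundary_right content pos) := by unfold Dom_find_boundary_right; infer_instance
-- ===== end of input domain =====

-- B replaces A's per-'|' re-slice/split/count of the rest of the line by one precomputed pipe
-- counter decremented during a single scan (objective: faster, asymptotic).

-- ===== PORT A =====
-- A's while-loop, fuel = (length - pos).toNat (the loop advances pos by 1 while pos < length).
-- content[pos:].split('\n')[0] is ported as takeWhile (· ≠ '\n') of the slice, which is exactly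
-- the first component of str.split('\n'); .getD ' ' stands for an index error (excluded by Pre_,
-- and inside the or-test it is only reached when the first disjunct already decided the test).
def findBoundaryGoA (cs : List Char) (length : Int) : Int → Nat → Int
  | pos, 0 => pos
  | pos, fuel + 1 =>
    if pos < length then
      let char := (PySem.List.pyGet? cs pos).getD ' '
      if char = '\n' then pos + 1
      else if char = '.' ∧ (pos + 1 ≥ length ∨ (PySem.List.pyGet? cs (pos + 1)).getD ' ' ∈ [' ', '\n']) then pos + 1
      else if char = '|' ∧ ((PySem.List.slice cs (some pos) none).takeWhile (fun c => c ≠ '\n')).count '|' ≤ 1 then pos + 1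
      else findBoundaryGoA cs length (pos + 1) fuel
    else pos

def find_boundary_right (content : String) (pos : Int) : Int :=
  let cs := content.toList
  let length : Int := cs.length
  findBoundaryGoA cs length pos (length - pos).toNat

-- ===== PORT B =====
-- Source B's for-loop over tail as structural recursion; j = pos + off; tail[off+1] is the head of
-- the rest of the list (rest = [] ↔ off + 1 = len(tail)); split('\n', 1)[0] is takeWhile (· ≠ '\n').
def findBoundaryGoB (n : Int) : Int → Int → List Char → Int
  | _, _, [] => n
  | pipes, j, c :: rest =>
    if c = '\n' then j + 1
    else if c = '.' ∧ (rest = [] ∨ (PySem.List.pyGet? rest 0).getD ' ' ∈ [' ', '\n']) then j + 1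
    else if c = '|' then
      if pipes ≤ 1 then j + 1 else findBoundaryGoB n (pipes - 1) (j + 1) rest
    else findBoundaryGoB n pipes (j + 1) rest

def find_boundary_right_alt (content : String) (pos : Int) : Int :=
  let cs := content.toList
  let n : Int := cs.length
  if pos ≥ n then pos
  else
    let tail := PySem.List.slice cs (some pos) none
    let pipes : Int := (tail.takeWhile (fun c => c ≠ '\n')).count '|'
    findBoundaryGoB n pipes pos tail

-- ===== PRECONDITION & SPEC =====
-- Pre_ restricts to the natural domain of the task (a position inside or past the text): for
-- pos < -len(content) A raises IndexError, and for -len(content) ≤ pos < 0 A's value arises from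
-- Python's negative-index wraparound, which B does not mirror (see cites in the claim).
def Pre_find_boundary_right (content : String) (pos : Int) : Prop := 0 ≤ pos
instance (content : String) (pos : Int) : Decidable (Pre_find_boundary_right content pos) := by unfold Pre_find_boundary_right; infer_instance

def pvWitness_find_boundary_right : String × Int := ("a|b.\nx", 1)

def Spec_find_boundary_right (content : String) (pos : Int) (out : Int) : Prop := out = find_boundary_right_alt content pos
instance (content : String) (pos : Int) (out : Int) : Decidable (Spec_find_boundary_right content pos out) := by unfold Spec_find_boundary_right; infer_instance

-- ===== CLAIM (what is proved, stated in full; the proofs are below) =====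
def Claim_equal_find_boundary_right : Prop := ∀ (content : String) (pos : Int), Dom_find_boundary_right content pos → Pre_find_boundary_right content pos → Spec_find_boundary_right content pos (find_boundary_right content pos)

-- ===== LEMMAS AND PROOFS =====

-- Offset (+1) of the first boundary of the scanned list, none if there is no boundary.
def pvStep : List Char → Option Int
  | [] => none
  | c :: rest =>
    if c = '\n' then some 1
    else if c = '.' ∧ (rest = [] ∨ rest.headD ' ' ∈ [' ', '\n']) then some 1
    else if c = '|' ∧ ((c :: rest).takeWhile (fun d => d ≠ '\n')).count '|' ≤ 1 then some 1
    else (pvStep rest).map (· + 1)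

theorem pvGoA_eq (cs : List Char) : ∀ (fuel : Nat) (pos : Int), 0 ≤ pos → pos ≤ cs.length →
    (cs.length : Int) ≤ pos + fuel →
    findBoundaryGoA cs cs.length pos fuel =
      (match pvStep (cs.drop pos.toNat) with
       | some k => pos + k
       | none => (cs.length : Int)) := by
  intro fuel
  induction fuel with
  | zero =>
    intro pos h0 hle hf
    have hpos : pos = (cs.length : Int) := by omega
    have : cs.drop pos.toNat = [] := by
      rw [List.drop_eq_nil_iff]; omega
    rw [findBoundaryGoA, this, pvStep, hpos]
  | succ fuel ih =>
    intro pos h0 hle hf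
    rw [findBoundaryGoA]
    by_cases hlt : pos < (cs.length : Int)
    · rw [if_pos hlt]
      have hm : pos.toNat < cs.length := by omega
      have hdrop : cs.drop pos.toNat = cs[pos.toNat] :: cs.drop (pos.toNat + 1) :=
        List.drop_eq_getElem_cons hm
      have hchar : (PySem.List.pyGet? cs pos).getD ' ' = cs[pos.toNat] := by
        rw [PySem.List.pyGet?_eq_some_getElem cs h0 (by exact_mod_cast hlt)]; rfl
      have hsl : PySem.List.slice cs (some pos) none = cs[pos.toNat] :: cs.drop (pos.toNat + 1) := by
        rw [PySem.List.slice_from cs h0, hdrop]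
      rw [hdrop, pvStep]
      simp only [hchar, hsl]
      set c := cs[pos.toNat] with hc
      set rest := cs.drop (pos.toNat + 1) with hrest
      by_cases h1 : c = '\n'
      · rw [if_pos h1, if_pos h1]
      · rw [if_neg h1, if_neg h1]
        have hdot : (pos + 1 ≥ (cs.length : Int) ∨ (PySem.List.pyGet? cs (pos + 1)).getD ' ' ∈ [' ', '\n'])
            ↔ (rest = [] ∨ rest.headD ' ' ∈ [' ', '\n']) := by
          by_cases hend : pos + 1 < (cs.length : Int)
          · have hne : rest ≠ [] := by
              rw [hrest, ne_eq, List.drop_eq_nil_iff]; omega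
            have hv : (PySem.List.pyGet? cs (pos + 1)).getD ' ' = rest.headD ' ' := by
              rw [PySem.List.pyGet?_eq_some_getElem cs (by omega) (by exact_mod_cast hend)]
              rw [hrest, List.headD_eq_head?, List.head?_drop]
              simp only [show (pos + 1).toNat = pos.toNat + 1 from by omega]
              rw [List.getElem?_eq_getElem (by omega)]
            constructor
            · rintro (hge | hmem)
              · omega
              · right; rwa [hv] at hmem
            · rintro (hnil | hmem)
              · exact absurd hnil hne
              · right; rwa [hv]
          · have hnil : rest = [] := by rw [hrest, List.drop_eq_nil_iff]; omega
            constructor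
            · intro _; left; exact hnil
            · intro _; left; omega
        by_cases h2 : c = '.' ∧ (rest = [] ∨ rest.headD ' ' ∈ [' ', '\n'])
        · rw [if_pos ⟨h2.1, hdot.mpr h2.2⟩, if_pos h2]
        · rw [if_neg (fun hx => h2 ⟨hx.1, hdot.mp hx.2⟩), if_neg h2]
          by_cases h3 : c = '|' ∧ ((c :: rest).takeWhile (fun d => d ≠ '\n')).count '|' ≤ 1
          · rw [if_pos h3, if_pos h3]
          · rw [if_neg h3, if_neg h3]
            have hstep : cs.drop (pos + 1).toNat = rest := by
              rw [hrest]; congr 1; omega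
            rw [ih (pos + 1) (by omega) (by omega) (by omega), hstep]
            cases hs : pvStep rest
            · simp
            · simp; ring
    · rw [if_neg hlt]
      have hpos : pos = (cs.length : Int) := by omega
      have : cs.drop pos.toNat = [] := by rw [List.drop_eq_nil_iff]; omega
      rw [this, pvStep, hpos]

theorem pvGoB_eq (n : Int) : ∀ (ts : List Char) (pipes j : Int),
    pipes = ((ts.takeWhile (fun c => c ≠ '\n')).count '|' : Int) →
    findBoundaryGoB n pipes j ts =
      (match pvStep ts with
       | some k => j + k
       | none => n) := by
  intro ts
  induction ts with
  | nil => intro pipes j h; simp [findBoundaryGoB, pvStep]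
  | cons c rest ih =>
    intro pipes j h
    rw [findBoundaryGoB, pvStep]
    by_cases h1 : c = '\n'
    · simp [h1]
    · rw [if_neg h1, if_neg h1]
      have hget : (PySem.List.pyGet? rest 0).getD ' ' = rest.headD ' ' := by
        simp [PySem.List.pyGet?_zero, List.head?_eq_getElem?]
      rw [hget]
      by_cases h2 : c = '.' ∧ (rest = [] ∨ rest.headD ' ' ∈ [' ', '\n'])
      · rw [if_pos h2, if_pos h2]
      · rw [if_neg h2, if_neg h2]
        have htw : (c :: rest).takeWhile (fun d => d ≠ '\n') = c :: rest.takeWhile (fun d => d ≠ '\n') := by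
          simp [h1]
        have htw' : ((c :: rest).takeWhile (fun d => d ≠ '\n')).count '|' =
            (rest.takeWhile (fun d => d ≠ '\n')).count '|' + (if c = '|' then 1 else 0) := by
          rw [htw, List.count_cons]; simp
        by_cases h3 : c = '|'
        · rw [if_pos h3]
          have hcnt : pipes = ((rest.takeWhile (fun d => d ≠ '\n')).count '|' : Int) + 1 := by
            rw [h]
            have : (rest.takeWhile (fun c => c ≠ '\n')) = (rest.takeWhile (fun d => d ≠ '\n')) := rfl
            rw [show ((c :: rest).takeWhile (fun c => c ≠ '\n')) = ((c :: rest).takeWhile (fun d => d ≠ '\n')) from rfl, htw']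
            simp [h3]
          by_cases h4 : pipes ≤ 1
          · have hle : ((c :: rest).takeWhile (fun d => d ≠ '\n')).count '|' ≤ 1 := by
              rw [htw']; simp only [h3, if_pos]; omega
            rw [if_pos h4, if_pos ⟨h3, hle⟩]
          · have hnle : ¬ (c = '|' ∧ ((c :: rest).takeWhile (fun d => d ≠ '\n')).count '|' ≤ 1) := by
              intro hc
              have := hc.2
              rw [htw'] at this; simp only [h3, if_pos] at this; omega
            rw [if_neg h4, if_neg hnle]
            rw [ih (pipes - 1) (j + 1) (by omega)]
            cases hs : pvStep rest
            · simp
            · simp; ring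
        · rw [if_neg h3, if_neg (fun hc => h3 hc.1)]
          rw [ih pipes (j + 1) (by rw [h, show ((c :: rest).takeWhile (fun c => c ≠ '\n')) = ((c :: rest).takeWhile (fun d => d ≠ '\n')) from rfl, htw']; simp [h3])]
          cases hs : pvStep rest
          · simp
          · simp; ring

-- ===== VERDICT (by name: the statement is the Claim_ definition above) =====
theorem find_boundary_right_spec : Claim_equal_find_boundary_right := by
  intro content pos _ hpre
  have h0 : 0 ≤ pos := hpre
  unfold Spec_find_boundary_right find_boundary_right find_boundary_right_alt
  dsimp only
  by_cases hge : pos ≥ ((content.toList.length : Int))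
  · rw [if_pos hge]
    have hz : (((content.toList.length : Int)) - pos).toNat = 0 := by omega
    rw [hz, findBoundaryGoA]
  · rw [if_neg hge]
    have hsl : PySem.List.slice content.toList (some pos) none = content.toList.drop pos.toNat :=
      PySem.List.slice_from content.toList h0
    rw [hsl]
    rw [pvGoB_eq (content.toList.length : Int) (content.toList.drop pos.toNat)
        ((((content.toList.drop pos.toNat).takeWhile (fun c => c ≠ '\n')).count '|' : Nat) : Int) pos rfl]
    rw [pvGoA_eq content.toList _ pos h0 (by omega) (by omega)]
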